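-- pv_equiv track=rewrite | github.com/SJPark97/Solved_Algorithm | 프로그래머스/lv2/17683. ［3차］ 방금그곡/［3차］ 방금그곡.py | solution
-- ===== SOURCE A (Python) =====
-- def solution(m, musicinfos):
--     answer = '(None)'
--     t = 0
--     for i in range(len(musicinfos)):
--         start, end, name, song = musicinfos[i].split(',')
--         time = 60 * (int(end[:2]) - int(start[:2])) + int(end[3:5]) - int(start[3:5])
--         if time > t:
--             result = ''
--             n = 0
--             cnt = time
--             while cnt > 0:
--                 result += song[n]
--                 if song[n] != '#':
--                     cnt -= 1
--                 n = (n + 1) % len(song)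
--             if song[n] == '#':
--                 result += '#'
--             if m[-1] == '#':
--                 if m in result:
--                     answer = name
--                     t = time
--             else:
--                 result = result.replace(m + '#', '.')
--                 if m in result:
--                     answer = name
--                     t = time
--     return answer
-- ===== SOURCE B (Python) =====
-- def solution(m, musicinfos):
--     # Equivalent rewrite: expand the song arithmetically (repeat + one-pass note-index
--     # list + slice) instead of A's char-by-char counting while-loop, collect matching
--     # entries with a single pass and pick the first longest with max().
--     def played(song, time):
--         k = sum(c != '#' for c in song)
--         full = song * (time // k + 2)
--         notes = [i for i, c in enumerate(full) if c != '#']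
--         cut = notes[time - 1] + 1
--         if full[cut] == '#':
--             cut += 1
--         return full[:cut]
--
--     def matches(melody, song, time):
--         if all(c == '#' for c in song):
--             return False  # a song with no real notes never sounds a note
--         p = played(song, time)
--         if melody.endswith('#'):
--             return melody in p
--         return melody in p.replace(melody + '#', '.')
--
--     cands = []
--     for info in musicinfos:
--         start, end, name, song = info.split(',')
--         time = 60 * (int(end[:2]) - int(start[:2])) + int(end[3:5]) - int(start[3:5])
--         if time >= 1 and matches(m, song, time):
--             cands.append((time, name))
--     if not cands:
--         return '(None)'
--     return max(cands, key=lambda c: c[0])[1]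
-- ===== Notes on version B (the rewrite author's own statement) =====
-- stated objective: alternative
-- what changed: B replaces A's char-by-char cyclic counting while-loop by an arithmetic expansion (repeat the song time//k+2 times, build the non-'#' index list in one pass, slice at the computed cut), and replaces A's online strict-threshold answer/t state by collecting all matching (time, name) candidates and taking max() by time (first maximum), keeping A's exact replace-trick matching; a song with no real notes naturally never matches in B.
-- outside the precondition, e.g. on solution('A', ['10:00,10:10,foo,AB', '10:00,10:05,bar,##']): A returns 'foo', B returns 'foo'
import Mathlib
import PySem

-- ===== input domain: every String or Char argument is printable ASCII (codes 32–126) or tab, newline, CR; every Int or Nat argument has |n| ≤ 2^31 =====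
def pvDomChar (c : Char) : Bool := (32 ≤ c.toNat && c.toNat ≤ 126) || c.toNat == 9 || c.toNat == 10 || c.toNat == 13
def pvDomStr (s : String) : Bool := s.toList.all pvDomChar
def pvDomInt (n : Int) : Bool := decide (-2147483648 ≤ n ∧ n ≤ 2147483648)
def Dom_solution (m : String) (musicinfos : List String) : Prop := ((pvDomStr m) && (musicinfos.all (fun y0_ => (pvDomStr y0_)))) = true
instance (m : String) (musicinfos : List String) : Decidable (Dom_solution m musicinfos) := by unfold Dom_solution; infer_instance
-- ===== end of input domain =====

-- B replaces A's char-by-char counting while-loop by an arithmetic expansion (repeat,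
-- note-index list, slice) and A's online best-so-far threshold by collect-then-max;
-- objective: alternative (a structurally different exact algorithm, no speed claim).


-- ===== PORT A =====
-- A's 'while cnt > 0' loop; fuel only makes the recursion total (it is proved large
-- enough under Pre_).  song[n] is s.getD n ' ': n < len(song) always holds when the
-- loop is reached inside Pre_ (empty songs are excluded there).
def solLoopA (s : List Char) (fuel : Nat) (n : Nat) (cnt : Int) (acc : List Char) : List Char × Nat :=
  if 0 < cnt then
    match fuel with
    | 0 => (acc, n)
    | f + 1 =>
      solLoopA s f ((n + 1) % s.length) (if s.getD n ' ' ≠ '#' then cnt - 1 else cnt)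
        (acc ++ [s.getD n ' '])
  else (acc, n)

-- one iteration of A's for-loop over musicinfos; state = (answer, t).
-- the '| _' branches (bad split / bad int) are Python's ValueError, excluded by Pre_;
-- m[-1] of an empty m is Python's IndexError, excluded by Pre_.
def solStepA (m : String) (st : String × Int) (info : String) : String × Int :=
  match PySem.Str.split? info "," with
  | some [start, stop, name, song] =>
    match PySem.Int.ofStr? (PySem.Str.slice stop none (some 2)),
          PySem.Int.ofStr? (PySem.Str.slice start none (some 2)),
          PySem.Int.ofStr? (PySem.Str.slice stop (some 3) (some 5)),
          PySem.Int.ofStr? (PySem.Str.slice start (some 3) (some 5)) with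
    | some e1, some s1, some e2, some s2 =>
      let time : Int := 60 * (e1 - s1) + e2 - s2
      if time > st.2 then
        let sl := song.toList
        let r := solLoopA sl ((time.toNat + 2) * sl.length) 0 time []
        let result := if sl.getD r.2 ' ' = '#' then r.1 ++ ['#'] else r.1
        if PySem.Str.pyGet? m (-1) = some '#' then
          if PySem.Chars.isIn m.toList result then (name, time) else st
        else
          if PySem.Chars.isIn m.toList (PySem.Chars.replace result (m.toList ++ ['#']) ['.']) then (name, time) else st
      else st
    | _, _, _, _ => st
  | _ => st

def solution (m : String) (musicinfos : List String) : String :=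
  (musicinfos.foldl (solStepA m) ("(None)", (0 : Int))).1

-- ===== PORT B =====
-- from Source B: played(song, time) — arithmetic expansion instead of a counting loop
def altPlayed (song : List Char) (time : Int) : List Char :=
  let k : Int := (song.map (fun c => if c ≠ '#' then (1 : Int) else 0)).sum
  let full := (List.replicate (PySem.Int.floordiv time k + 2).toNat song).flatten
  let notes := (PySem.List.enumerate full).filterMap (fun p => if p.2 ≠ '#' then some p.1 else none)
  let cut : Int := (PySem.List.pyGet? notes (time - 1)).getD 0 + 1
  let cut2 : Int := if PySem.List.pyGet? full cut = some '#' then cut + 1 else cut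
  PySem.List.slice full none (some cut2)

-- from Source B: matches(melody, song, time); a song of only '#' never sounds a note
def altMatches (melody : List Char) (song : List Char) (time : Int) : Bool :=
  if song.all (fun c => c == '#') then false
  else
    let p := altPlayed song time
    if PySem.Chars.endswith melody ['#'] then PySem.Chars.isIn melody p
    else PySem.Chars.isIn melody (PySem.Chars.replace p (melody ++ ['#']) ['.'])

-- one iteration of Source B's collecting loop; acc = cands
def solStepB (m : String) (acc : List (Int × String)) (info : String) : List (Int × String) :=
  match PySem.Str.split? info "," with
  | some [start, stop, name, song] =>
    match PySem.Int.ofStr? (PySem.Str.slice stop none (some 2)),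
          PySem.Int.ofStr? (PySem.Str.slice start none (some 2)),
          PySem.Int.ofStr? (PySem.Str.slice stop (some 3) (some 5)),
          PySem.Int.ofStr? (PySem.Str.slice start (some 3) (some 5)) with
    | some e1, some s1, some e2, some s2 =>
      let time : Int := 60 * (e1 - s1) + e2 - s2
      if decide (1 ≤ time) && altMatches m.toList song.toList time then acc ++ [(time, name)] else acc
    | _, _, _, _ => acc
  | _ => acc

def solution_alt (m : String) (musicinfos : List String) : String :=
  let cands := musicinfos.foldl (solStepB m) []
  match PySem.List.max? cands (fun c => c.1) with
  | some c => c.2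
  | none => "(None)"

-- ===== PRECONDITION & SPEC =====
-- helpers for Pre_ (input shape only; used by neither port)
def entryFields (info : String) : Option (String × String × String × String) :=
  match PySem.Str.split? info "," with
  | some [a, b, c, d] => some (a, b, c, d)
  | _ => none

def entryParses (info : String) : Bool :=
  match entryFields info with
  | some (start, stop, _, _) =>
      (PySem.Int.ofStr? (PySem.Str.slice stop none (some 2))).isSome &&
      (PySem.Int.ofStr? (PySem.Str.slice start none (some 2))).isSome &&
      (PySem.Int.ofStr? (PySem.Str.slice stop (some 3) (some 5))).isSome &&
      (PySem.Int.ofStr? (PySem.Str.slice start (some 3) (some 5))).isSome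
  | none => false

def entryTime (info : String) : Int :=
  match entryFields info with
  | some (start, stop, _, _) =>
      60 * (((PySem.Int.ofStr? (PySem.Str.slice stop none (some 2))).getD 0)
            - ((PySem.Int.ofStr? (PySem.Str.slice start none (some 2))).getD 0))
      + ((PySem.Int.ofStr? (PySem.Str.slice stop (some 3) (some 5))).getD 0)
      - ((PySem.Int.ofStr? (PySem.Str.slice start (some 3) (some 5))).getD 0)
  | none => 0

def entrySongOK (info : String) : Bool :=
  match entryFields info with
  | some (_, _, _, song) => song.toList.any (fun c => c ≠ '#')
  | none => false

-- Pre_ excludes the inputs where A raises (an entry that does not split into 4 comma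
-- fields or whose clock slices are not ints → ValueError; an empty melody next to a
-- positive-duration entry → IndexError) and all inputs carrying a positive-duration
-- entry whose song is empty or only '#': on such an entry A loops forever whenever its
-- strict running threshold admits it, and whether it does depends on A's running
-- state, which a closed-form condition cannot express, so all such inputs are excluded
-- conservatively; where A happens to skip such an entry and return, B returns A's
-- value anyway (such entries never match in B).
def Pre_solution (m : String) (musicinfos : List String) : Prop :=
  (∀ info ∈ musicinfos, entryParses info = true)
  ∧ (∀ info ∈ musicinfos, 1 ≤ entryTime info → entrySongOK info = true)
  ∧ (m ≠ "" ∨ ∀ info ∈ musicinfos, entryTime info ≤ 0)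
instance (m : String) (musicinfos : List String) : Decidable (Pre_solution m musicinfos) := by
  unfold Pre_solution; infer_instance

def pvWitness_solution : String × List String :=
  ("ABC", ["12:00,12:14,HELLO,C#DEFGAB", "13:00,13:05,WORLD,ABCDEF"])

def Spec_solution (m : String) (musicinfos : List String) (out : String) : Prop := out = solution_alt m musicinfos
instance (m : String) (musicinfos : List String) (out : String) : Decidable (Spec_solution m musicinfos out) := by unfold Spec_solution; infer_instance

-- ===== CLAIM (what is proved, stated in full; the proofs are below) =====
def Claim_equal_solution : Prop := ∀ (m : String) (musicinfos : List String), Dom_solution m musicinfos → Pre_solution m musicinfos → Spec_solution m musicinfos (solution m musicinfos)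

-- ===== LEMMAS AND PROOFS =====

-- the positions (from offset s) of the non-'#' characters of xs, in order
def notesIdx (xs : List Char) (s : Nat) : List Nat :=
  match xs with
  | [] => []
  | c :: r => if c ≠ '#' then s :: notesIdx r (s + 1) else notesIdx r (s + 1)

-- number of characters A's loop emits from xs while counting down c non-'#' chars
def cutSpec (xs : List Char) (c : Nat) : Nat :=
  match xs, c with
  | _, 0 => 0
  | [], _ + 1 => 0
  | ch :: r, c + 1 => 1 + cutSpec r (if ch = '#' then c + 1 else c)

theorem notesIdx_shift (xs : List Char) (s : Nat) :
    notesIdx xs s = (notesIdx xs 0).map (s + ·) := by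
  induction xs generalizing s with
  | nil => simp [notesIdx]
  | cons c r ih =>
    by_cases hc : c = '#' <;>
      simp only [notesIdx, hc, if_pos, if_neg, ne_eq, not_true_eq_false, not_false_eq_true,
        ite_true, ite_false, List.map_cons, List.map_map] <;>
      rw [ih (s + 1), ih 1, List.map_map] <;>
      [skip; refine List.cons_eq_cons.mpr ⟨by omega, ?_⟩] <;>
      · refine List.map_congr_left (fun i _ => ?_)
        simp [Function.comp]; omega

theorem length_notesIdx (xs : List Char) (s : Nat) :
    (notesIdx xs s).length = xs.countP (· ≠ '#') := by
  induction xs generalizing s with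
  | nil => simp [notesIdx]
  | cons c r ih =>
    by_cases hc : c = '#' <;> simp [notesIdx, hc, List.countP_cons, ih]

theorem notesIdx_lt (xs : List Char) (s : Nat) : ∀ i ∈ notesIdx xs s, i < s + xs.length := by
  induction xs generalizing s with
  | nil => simp [notesIdx]
  | cons c r ih =>
    intro i hi
    by_cases hc : c = '#' <;> simp [notesIdx, hc] at hi
    · have := ih (s + 1) i hi; simp only [List.length_cons]; omega
    · rcases hi with rfl | hi
      · simp only [List.length_cons]; omega
      · have := ih (s + 1) i hi; simp only [List.length_cons]; omega

theorem notesIdx_ge (xs : List Char) (s : Nat) : ∀ i ∈ notesIdx xs s, s ≤ i := by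
  induction xs generalizing s with
  | nil => simp [notesIdx]
  | cons c r ih =>
    intro i hi
    by_cases hc : c = '#' <;> simp [notesIdx, hc] at hi
    · have := ih (s + 1) i hi; omega
    · rcases hi with rfl | hi
      · omega
      · have := ih (s + 1) i hi; omega

theorem notesIdx_pairwise (xs : List Char) (s : Nat) : (notesIdx xs s).Pairwise (· < ·) := by
  induction xs generalizing s with
  | nil => simp [notesIdx]
  | cons c r ih =>
    by_cases hc : c = '#'
    · rw [notesIdx, if_neg (not_not.mpr hc)]; exact ih (s + 1)
    · rw [notesIdx, if_pos hc]
      exact List.pairwise_cons.mpr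
        ⟨fun i hi => by have := notesIdx_ge r (s + 1) i hi; omega, ih (s + 1)⟩

theorem enumerate_filterMap_notes (xs : List Char) (s : Int) :
    (PySem.List.enumerate xs s).filterMap (fun p => if p.2 ≠ '#' then some p.1 else none)
      = (notesIdx xs 0).map (fun i : Nat => s + (i : Int)) := by
  induction xs generalizing s with
  | nil => simp [notesIdx, PySem.List.enumerate_nil]
  | cons c r ih =>
    rw [PySem.List.enumerate_cons, List.filterMap_cons]
    by_cases hc : c = '#'
    · rw [notesIdx, if_neg (not_not.mpr hc)]
      simp only [hc, ne_eq, not_true_eq_false, ite_false, reduceIte]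
      rw [ih (s + 1), notesIdx_shift r 1, List.map_map]
      refine List.map_congr_left (fun i _ => ?_)
      simp only [Function.comp_apply]
      push_cast; ring
    · rw [notesIdx, if_pos hc]
      simp only [ne_eq, hc, not_false_eq_true, ite_true, reduceIte]
      rw [ih (s + 1), notesIdx_shift r 1, List.map_cons, List.map_map]
      refine List.cons_eq_cons.mpr ⟨by push_cast; ring, ?_⟩
      refine List.map_congr_left (fun i _ => ?_)
      simp only [Function.comp_apply]
      push_cast; ring

theorem countP_ne_sharp_cons (ch : Char) (r : List Char) :
    (ch :: r).countP (· ≠ '#') = (if ch = '#' then 0 else 1) + r.countP (· ≠ '#') := by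
  by_cases hc : ch = '#' <;> simp [List.countP_cons, hc] <;> omega

theorem cutSpec_le_length (xs : List Char) (c : Nat) : cutSpec xs c ≤ xs.length := by
  induction xs generalizing c with
  | nil => cases c <;> simp [cutSpec]
  | cons ch r ih =>
    cases c with
    | zero => simp [cutSpec]
    | succ c' =>
      simp only [cutSpec, List.length_cons]
      have := ih (if ch = '#' then c' + 1 else c')
      omega

theorem cut_eq_note (xs : List Char) (c : Nat) (h : c < xs.countP (· ≠ '#')) :
    cutSpec xs (c + 1) = (notesIdx xs 0)[c]'(by rw [length_notesIdx]; exact h) + 1 := by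
  induction xs generalizing c with
  | nil => simp at h
  | cons ch r ih =>
    rw [countP_ne_sharp_cons] at h
    by_cases hc : ch = '#'
    · have h' : c < r.countP (· ≠ '#') := by rw [if_pos hc] at h; omega
      have hrec := ih c h'
      rw [cutSpec, if_pos hc, hrec]
      have hnx : notesIdx (ch :: r) 0 = (notesIdx r 0).map (1 + ·) := by
        rw [notesIdx, if_neg (not_not.mpr hc), notesIdx_shift r 1]
      simp only [List.getElem_of_eq hnx, List.getElem_map]
      omega
    · have hnx : notesIdx (ch :: r) 0 = 0 :: (notesIdx r 0).map (1 + ·) := by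
        rw [notesIdx, if_pos hc, notesIdx_shift r 1]
      cases c with
      | zero =>
        rw [cutSpec, if_neg hc, cutSpec]
        simp [List.getElem_of_eq hnx]
      | succ c' =>
        have h' : c' < r.countP (· ≠ '#') := by rw [if_neg hc] at h; omega
        have hrec := ih c' h'
        rw [cutSpec, if_neg hc, hrec]
        simp only [List.getElem_of_eq hnx, List.getElem_cons_succ, List.getElem_map]
        omega

theorem length_flatten_replicate' (sl : List Char) (reps : Nat) :
    ((List.replicate reps sl).flatten).length = reps * sl.length := by
  induction reps with
  | zero => simp
  | succ r ih => simp [List.replicate_succ, ih]; ring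

theorem flatten_replicate_getD (sl : List Char) (reps j : Nat)
    (h : j < reps * sl.length) :
    ((List.replicate reps sl).flatten).getD j ' ' = sl.getD (j % sl.length) ' ' := by
  induction reps generalizing j with
  | zero => simp at h
  | succ r ih =>
    rw [List.replicate_succ, List.flatten_cons]
    by_cases hj : j < sl.length
    · rw [List.getD_eq_getElem?_getD, List.getElem?_append_left hj,
        ← List.getD_eq_getElem?_getD, Nat.mod_eq_of_lt hj]
    · rw [Nat.not_lt] at hj
      have h2 : j - sl.length < r * sl.length := by
        have : (r + 1) * sl.length = r * sl.length + sl.length := by ring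
        omega
      rw [List.getD_eq_getElem?_getD, List.getElem?_append_right hj,
        ← List.getD_eq_getElem?_getD, ih (j - sl.length) h2, Nat.mod_eq_sub_mod hj]



theorem countP_flatten_replicate (sl : List Char) (reps : Nat) :
    ((List.replicate reps sl).flatten).countP (· ≠ '#') = reps * sl.countP (· ≠ '#') := by
  induction reps with
  | zero => simp
  | succ r ih => simp [List.replicate_succ, List.countP_append, ih]; ring

-- A's loop is a linear scan of the unrolled song
theorem loopA_scan (sl : List Char) (hL : sl ≠ []) (reps : Nat) :
    ∀ (fuel c j : Nat) (acc : List Char),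
      j ≤ ((List.replicate reps sl).flatten).length →
      c ≤ (((List.replicate reps sl).flatten).drop j).countP (· ≠ '#') →
      cutSpec (((List.replicate reps sl).flatten).drop j) c ≤ fuel →
      solLoopA sl fuel (j % sl.length) (c : Int) acc
        = (acc ++ (((List.replicate reps sl).flatten).drop j).take
              (cutSpec (((List.replicate reps sl).flatten).drop j) c),
           (j + cutSpec (((List.replicate reps sl).flatten).drop j) c) % sl.length) := by
  have hL : 0 < sl.length := List.length_pos_of_ne_nil hL
  intro fuel
  induction fuel with
  | zero =>
    intro c j acc h1 h2 h3
    cases c with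
    | zero => rw [solLoopA]; simp [cutSpec]
    | succ c' =>
      exfalso
      cases hd : ((List.replicate reps sl).flatten).drop j with
      | nil => rw [hd] at h2; simp at h2
      | cons x r => rw [hd] at h3; simp [cutSpec] at h3
  | succ f ih =>
    intro c j acc h1 h2 h3
    cases c with
    | zero => rw [solLoopA]; simp [cutSpec]
    | succ c' =>
      set F := (List.replicate reps sl).flatten with hF
      have hlenF : F.length = reps * sl.length := by
        rw [hF]; exact length_flatten_replicate' sl reps
      have hdne : F.drop j ≠ [] := by
        intro hnil; rw [hnil] at h2; simp at h2
      have hj : j < F.length := by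
        by_contra hb; push_neg at hb
        exact hdne (List.drop_eq_nil_of_le hb)
      have hgetj : F.getD j ' ' = F[j]'hj := List.getD_eq_getElem F ' ' hj
      have hdropC : F.drop j = F.getD j ' ' :: F.drop (j + 1) := by
        rw [hgetj]; exact List.drop_eq_getElem_cons hj
      have hch : sl.getD (j % sl.length) ' ' = F.getD j ' ' :=
        (flatten_replicate_getD sl reps j (by omega)).symm
      have hmod : (j % sl.length + 1) % sl.length = (j + 1) % sl.length :=
        (Nat.mod_modEq j sl.length).add_right 1
      have hcnt : (0 : Int) < ((c' + 1 : Nat) : Int) := by positivity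
      rw [solLoopA, if_pos hcnt]
      simp only [hch]
      -- the two loop branches, by whether the current char is '#'
      by_cases hsharp : F.getD j ' ' = '#'
      · have hcut : cutSpec (F.drop j) (c' + 1) = 1 + cutSpec (F.drop (j + 1)) (c' + 1) := by
          rw [hdropC, cutSpec, if_pos hsharp]
        have hcnt2 : (c' + 1 : Nat) ≤ (F.drop (j + 1)).countP (· ≠ '#') := by
          rw [hdropC, countP_ne_sharp_cons, if_pos hsharp] at h2; omega
        have hfuel : cutSpec (F.drop (j + 1)) (c' + 1) ≤ f := by omega
        rw [if_neg (not_not.mpr hsharp), hmod]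
        rw [ih (c' + 1) (j + 1) (acc ++ [F.getD j ' ']) (by omega) hcnt2 hfuel]
        rw [hcut, hdropC, Nat.add_comm 1 (cutSpec (F.drop (j + 1)) (c' + 1)), List.take_succ_cons]
        have hidx : j + 1 + cutSpec (F.drop (j + 1)) (c' + 1)
            = j + (cutSpec (F.drop (j + 1)) (c' + 1) + 1) := by omega
        rw [hidx]
        simp [List.append_assoc]
      · have hcut : cutSpec (F.drop j) (c' + 1) = 1 + cutSpec (F.drop (j + 1)) c' := by
          rw [hdropC, cutSpec, if_neg hsharp]
        have hcnt2 : c' ≤ (F.drop (j + 1)).countP (· ≠ '#') := by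
          rw [hdropC, countP_ne_sharp_cons, if_neg hsharp] at h2; omega
        have hfuel : cutSpec (F.drop (j + 1)) c' ≤ f := by omega
        have hc'cast : ((c' + 1 : Nat) : Int) - 1 = ((c' : Nat) : Int) := by push_cast; ring
        rw [if_pos hsharp, hc'cast, hmod]
        rw [ih c' (j + 1) (acc ++ [F.getD j ' ']) (by omega) hcnt2 hfuel]
        rw [hcut, hdropC, Nat.add_comm 1 (cutSpec (F.drop (j + 1)) c'), List.take_succ_cons]
        have hidx : j + 1 + cutSpec (F.drop (j + 1)) c'
            = j + (cutSpec (F.drop (j + 1)) c' + 1) := by omega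
        rw [hidx]
        simp [List.append_assoc]

-- per-entry equality of the built strings: A's loop+append = B's altPlayed
theorem sum_ite_ne_sharp (sl : List Char) :
    (sl.map (fun c => if c ≠ '#' then (1 : Int) else 0)).sum = (sl.countP (· ≠ '#') : Int) := by
  induction sl with
  | nil => simp
  | cons c r ih =>
    by_cases hc : c = '#' <;> rw [List.map_cons, List.sum_cons, ih, countP_ne_sharp_cons] <;>
      simp [hc]

theorem result_eq_altPlayed (sl : List Char) (hs : sl.any (fun c => c ≠ '#') = true)
    (t : Nat) (ht : 1 ≤ t) :
    (if sl.getD (solLoopA sl ((t + 2) * sl.length) 0 (t : Int) []).2 ' ' = '#'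
     then (solLoopA sl ((t + 2) * sl.length) 0 (t : Int) []).1 ++ ['#']
     else (solLoopA sl ((t + 2) * sl.length) 0 (t : Int) []).1) = altPlayed sl (t : Int) := by
  have hne : sl ≠ [] := by rintro rfl; simp at hs
  have hL : 0 < sl.length := List.length_pos_of_ne_nil hne
  set knat := sl.countP (· ≠ '#') with hknat
  have hk : 0 < knat := by
    obtain ⟨c, hc, hcp⟩ := List.any_eq_true.mp hs
    rw [hknat]
    exact List.countP_pos_iff.mpr ⟨c, hc, hcp⟩
  set reps := t / knat + 2 with hreps
  set F := (List.replicate reps sl).flatten with hF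
  have hFlen : F.length = reps * sl.length := length_flatten_replicate' sl reps
  have hFcount : F.countP (· ≠ '#') = reps * knat := countP_flatten_replicate sl reps
  have htle : t + 1 ≤ reps * knat := by
    have hdm := Nat.div_add_mod t knat
    have hmlt := Nat.mod_lt t hk
    have hrk : reps * knat = knat * (t / knat) + 2 * knat := by rw [hreps]; ring
    omega
  set cut0 := cutSpec F t with hcut0
  have hcut0_le : cut0 ≤ F.length := cutSpec_le_length F t
  have hfuel : cut0 ≤ (t + 2) * sl.length := by
    have h1 : reps ≤ t + 2 := by have := Nat.div_le_self t knat; omega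
    have h2 : reps * sl.length ≤ (t + 2) * sl.length := Nat.mul_le_mul_right _ h1
    omega
  have hloop := loopA_scan sl hne reps ((t + 2) * sl.length) t 0 []
    (by omega) (by rw [List.drop_zero, hFcount]; omega) (by rw [List.drop_zero]; exact hfuel)
  rw [Nat.zero_mod, List.drop_zero, List.nil_append, Nat.zero_add] at hloop
  obtain ⟨t', rfl⟩ : ∃ t', t = t' + 1 := ⟨t - 1, by omega⟩
  have hlen_notes : (notesIdx F 0).length = reps * knat := by
    rw [length_notesIdx, hFcount]
  have ht'' : t' < (notesIdx F 0).length := by omega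
  have ht''1 : t' + 1 < (notesIdx F 0).length := by omega
  have hnote : cut0 = (notesIdx F 0)[t']'ht'' + 1 := by
    rw [hcut0]; exact cut_eq_note F t' (by omega)
  have hp_lt : (notesIdx F 0)[t']'ht'' < F.length := by
    have := notesIdx_lt F 0 _ (List.getElem_mem ht'')
    omega
  have hp_next : (notesIdx F 0)[t']'ht'' < (notesIdx F 0)[t' + 1]'ht''1 :=
    List.pairwise_iff_getElem.mp (notesIdx_pairwise F 0) t' (t' + 1) ht'' ht''1 (by omega)
  have hnext_lt : (notesIdx F 0)[t' + 1]'ht''1 < F.length := by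
    have := notesIdx_lt F 0 _ (List.getElem_mem ht''1)
    omega
  have hcut0_lt : cut0 < F.length := by omega
  -- the character both sides test
  have hchar : sl.getD (cut0 % sl.length) ' ' = F[cut0]'hcut0_lt := by
    rw [← flatten_replicate_getD sl reps cut0 (by omega), ← hF, List.getD_eq_getElem]
  -- now unfold B
  rw [altPlayed]
  simp only [sum_ite_ne_sharp sl, ← hknat, PySem.Int.floordiv, ← Int.ofNat_fdiv]
  have htn : ((((t' + 1) / knat : Nat) : Int) + 2).toNat = reps := by
    rw [hreps]; generalize (t' + 1) / knat = q; omega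
  rw [htn, ← hF]
  rw [enumerate_filterMap_notes F 0]
  have hc1 : ((t' + 1 : Nat) : Int) - 1 = ((t' : Nat) : Int) := by push_cast; ring
  rw [hc1, PySem.List.pyGet?_natCast]
  rw [List.getElem?_map, List.getElem?_eq_getElem ht'']
  simp only [Option.map_some, Option.getD_some]
  have hc2 : (0 : Int) + ((notesIdx F 0)[t']'ht'' : Int) + 1 = ((cut0 : Nat) : Int) := by
    rw [hnote]; push_cast; ring
  rw [hc2, PySem.List.pyGet?_natCast, List.getElem?_eq_getElem hcut0_lt]
  -- both sides branch on the same character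
  rw [hloop]
  by_cases hch : F[cut0]'hcut0_lt = '#'
  · rw [if_pos (by rw [hchar]; exact hch), if_pos (by rw [hch])]
    have hc3 : ((cut0 : Nat) : Int) + 1 = ((cut0 + 1 : Nat) : Int) := by push_cast; ring
    rw [hc3, PySem.List.slice_to_natCast, List.take_add_one, List.getElem?_eq_getElem hcut0_lt]
    rw [hch]
    rfl
  · rw [if_neg (by rw [hchar]; exact hch), if_neg (by simpa using hch)]
    rw [PySem.List.slice_to_natCast]

theorem last_sharp_iff (ml : List Char) :
    (PySem.List.pyGet? ml (-1) = some '#') ↔ PySem.Chars.endswith ml ['#'] = true := by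
  rw [PySem.List.pyGet?_neg_one, PySem.Chars.endswith_iff, List.getLast?_eq_some_iff]
  constructor
  · rintro ⟨ys, rfl⟩; exact ⟨ys, rfl⟩
  · rintro ⟨ys, h⟩; exact ⟨ys, h.symm⟩

-- the per-entry step of A, rephrased through B's match test
theorem stepA_eq (m : String) (st : String × Int) (info : String)
    (hp : entryParses info = true)
    (hsong : 1 ≤ entryTime info → entrySongOK info = true)
    (hst : 0 ≤ st.2) :
    solStepA m st info =
      if st.2 < entryTime info ∧ altMatches m.toList
          (match entryFields info with | some (_,_,_,song) => song.toList | none => []) (entryTime info) = true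
      then ((match entryFields info with | some (_,_,name,_) => name | none => ""), entryTime info)
      else st := by
  rw [solStepA]
  cases hsp : PySem.Str.split? info "," with
  | none => simp [entryParses, entryFields, hsp] at hp
  | some parts =>
    rcases parts with _ | ⟨start, _ | ⟨stop, _ | ⟨name, _ | ⟨song, _ | ⟨x, rest⟩⟩⟩⟩⟩ <;>
      try simp [entryParses, entryFields, hsp] at hp
    have hef : entryFields info = some (start, stop, name, song) := by
      simp [entryFields, hsp]
    cases he1 : PySem.Int.ofStr? (PySem.Str.slice stop none (some 2)) with
    | none => rw [he1] at hp; simp at hp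
    | some e1 =>
    cases hs1 : PySem.Int.ofStr? (PySem.Str.slice start none (some 2)) with
    | none => rw [hs1] at hp; simp at hp
    | some s1 =>
    cases he2 : PySem.Int.ofStr? (PySem.Str.slice stop (some 3) (some 5)) with
    | none => rw [he2] at hp; simp at hp
    | some e2 =>
    cases hs2 : PySem.Int.ofStr? (PySem.Str.slice start (some 3) (some 5)) with
    | none => rw [hs2] at hp; simp at hp
    | some s2 =>
    have hti : entryTime info = 60 * (e1 - s1) + e2 - s2 := by
      rw [entryTime, hef]; simp [he1, hs1, he2, hs2]
    simp only [he1, hs1, he2, hs2, hef, hti]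
    set T : Int := 60 * (e1 - s1) + e2 - s2 with hT
    by_cases hgt : st.2 < T
    · have ht1 : 1 ≤ T := by omega
      have hsany : song.toList.any (fun c => c ≠ '#') = true := by
        have := hsong (by omega)
        rw [entrySongOK, hef] at this
        exact this
      have hall : (song.toList.all (fun c => c == '#')) = false := by
        obtain ⟨c, hc, hcp⟩ := List.any_eq_true.mp hsany
        refine List.all_eq_false.mpr ⟨c, hc, ?_⟩
        simpa using hcp
      have hcast : T = ((T.toNat : Nat) : Int) := by omega
      have hres := result_eq_altPlayed song.toList hsany T.toNat (by omega)
      rw [← hcast] at hres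
      rw [if_pos hgt, hres]
      rw [altMatches]
      simp only [hall, Bool.false_eq_true, if_false]
      simp only [PySem.Str.pyGet?_eq, PySem.Chars.pyGet?_eq_listPyGet?]
      by_cases hends : PySem.Chars.endswith m.toList ['#'] = true
      · rw [if_pos ((last_sharp_iff m.toList).mpr hends), if_pos hends]
        by_cases hin : PySem.Chars.isIn m.toList (altPlayed song.toList T) = true
        · rw [if_pos hin, if_pos ⟨by omega, hin⟩]
        · rw [if_neg hin, if_neg (by rintro ⟨-, h⟩; exact hin h)]
      · rw [if_neg (fun h => hends ((last_sharp_iff m.toList).mp h)), if_neg hends]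
        by_cases hin : PySem.Chars.isIn m.toList
            (PySem.Chars.replace (altPlayed song.toList T)
              (m.toList ++ ['#']) ['.']) = true
        · rw [if_pos hin, if_pos ⟨by omega, hin⟩]
        · rw [if_neg hin, if_neg (by rintro ⟨-, h⟩; exact hin h)]
    · rw [if_neg (by omega : ¬ T > st.2), if_neg (by rintro ⟨h, -⟩; exact hgt h)]

theorem stepB_eq (m : String) (acc : List (Int × String)) (info : String)
    (hp : entryParses info = true) :
    solStepB m acc info =
      if 1 ≤ entryTime info ∧ altMatches m.toList
          (match entryFields info with | some (_,_,_,song) => song.toList | none => []) (entryTime info) = true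
      then acc ++ [(entryTime info, (match entryFields info with | some (_,_,name,_) => name | none => ""))]
      else acc := by
  rw [solStepB]
  cases hsp : PySem.Str.split? info "," with
  | none => simp [entryParses, entryFields, hsp] at hp
  | some parts =>
    rcases parts with _ | ⟨start, _ | ⟨stop, _ | ⟨name, _ | ⟨song, _ | ⟨x, rest⟩⟩⟩⟩⟩ <;>
      try simp [entryParses, entryFields, hsp] at hp
    have hef : entryFields info = some (start, stop, name, song) := by
      simp [entryFields, hsp]
    cases he1 : PySem.Int.ofStr? (PySem.Str.slice stop none (some 2)) with
    | none => rw [he1] at hp; simp at hp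
    | some e1 =>
    cases hs1 : PySem.Int.ofStr? (PySem.Str.slice start none (some 2)) with
    | none => rw [hs1] at hp; simp at hp
    | some s1 =>
    cases he2 : PySem.Int.ofStr? (PySem.Str.slice stop (some 3) (some 5)) with
    | none => rw [he2] at hp; simp at hp
    | some e2 =>
    cases hs2 : PySem.Int.ofStr? (PySem.Str.slice start (some 3) (some 5)) with
    | none => rw [hs2] at hp; simp at hp
    | some s2 =>
    have hti : entryTime info = 60 * (e1 - s1) + e2 - s2 := by
      rw [entryTime, hef]; simp [he1, hs1, he2, hs2]
    simp only [he1, hs1, he2, hs2, hef, hti]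
    set T : Int := 60 * (e1 - s1) + e2 - s2 with hT
    by_cases h1 : 1 ≤ T
    · by_cases h2 : altMatches m.toList song.toList T = true
      · rw [if_pos (by simp [h1, h2]), if_pos ⟨h1, h2⟩]
      · rw [if_neg (by simp [h2]), if_neg (by rintro ⟨-, h⟩; exact h2 h)]
    · rw [if_neg (by simp [h1]), if_neg (by rintro ⟨h, -⟩; exact h1 h)]

def maxStep (acc : Option (Int × String)) (y : Int × String) : Option (Int × String) :=
  match acc with
  | none => some y
  | some m => if m.1 < y.1 then some y else some m

theorem max?_eq_foldl_maxStep (l : List (Int × String)) :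
    PySem.List.max? l (fun c => c.1) = l.foldl maxStep none := by
  unfold PySem.List.max?
  congr 1
  funext acc y
  cases acc <;> simp [maxStep]

def stateOf (cands : List (Int × String)) : String × Int :=
  match PySem.List.max? cands (fun c => c.1) with
  | some c => (c.2, c.1)
  | none => ("(None)", 0)

theorem max?_append_singleton (cands : List (Int × String)) (x : Int × String) :
    PySem.List.max? (cands ++ [x]) (fun c => c.1)
      = match PySem.List.max? cands (fun c => c.1) with
        | none => some x
        | some mm => if mm.1 < x.1 then some x else some mm := by
  rw [max?_eq_foldl_maxStep, max?_eq_foldl_maxStep, List.foldl_append, List.foldl_cons,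
    List.foldl_nil]
  cases h : List.foldl maxStep none cands <;> simp [maxStep]

theorem fold_inv (m : String) (infos : List String)
    (hp : ∀ info ∈ infos, entryParses info = true)
    (hsong : ∀ info ∈ infos, 1 ≤ entryTime info → entrySongOK info = true)
    (hm : m ≠ "" ∨ ∀ info ∈ infos, entryTime info ≤ 0) :
    ∀ (cands : List (Int × String)), (∀ x ∈ cands, 1 ≤ x.1) →
      infos.foldl (solStepA m) (stateOf cands) = stateOf (infos.foldl (solStepB m) cands) := by
  induction infos with
  | nil => intro cands _; rfl
  | cons info rest ih =>
    intro cands hc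
    have hpi := hp info (by simp)
    have hsi := hsong info (by simp)
    have hp' : ∀ i ∈ rest, entryParses i = true := fun i hi => hp i (List.mem_cons_of_mem _ hi)
    have hsong' : ∀ i ∈ rest, 1 ≤ entryTime i → entrySongOK i = true :=
      fun i hi => hsong i (List.mem_cons_of_mem _ hi)
    have hm' : m ≠ "" ∨ ∀ i ∈ rest, entryTime i ≤ 0 := by
      rcases hm with h | h
      · exact Or.inl h
      · exact Or.inr (fun i hi => h i (List.mem_cons_of_mem _ hi))
    have hst0 : 0 ≤ (stateOf cands).2 := by
      rw [stateOf]
      cases h : PySem.List.max? cands (fun c => c.1) with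
      | none => simp
      | some c =>
        have := hc c (PySem.List.max?_mem h)
        simp only
        omega
    rw [List.foldl_cons, List.foldl_cons,
      stepA_eq m (stateOf cands) info hpi hsi hst0, stepB_eq m cands info hpi]
    set T := entryTime info with hT
    set sng := (match entryFields info with | some (_,_,_,song) => song.toList | none => ([] : List Char)) with hsng
    set nm := (match entryFields info with | some (_,_,name,_) => name | none => "") with hnm
    by_cases hM : 1 ≤ T ∧ altMatches m.toList sng T = true
    · rw [if_pos hM]
      by_cases hgt : (stateOf cands).2 < T
      · rw [if_pos ⟨hgt, hM.2⟩]
        have hnew : stateOf (cands ++ [(T, nm)]) = (nm, T) := by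
          rw [stateOf, max?_append_singleton]
          cases h : PySem.List.max? cands (fun c => c.1) with
          | none => simp
          | some mm =>
            have hmm : mm.1 = (stateOf cands).2 := by rw [stateOf, h]
            have hlt : mm.1 < T := by omega
            dsimp only
            rw [if_pos hlt]
        rw [← hnew]
        exact ih hp' hsong' hm' (cands ++ [(T, nm)]) (by
          intro x hx
          rcases List.mem_append.mp hx with hx | hx
          · exact hc x hx
          · rcases List.mem_singleton.mp hx with rfl
            exact hM.1)
      · rw [if_neg (by rintro ⟨h, -⟩; exact hgt h)]
        have hsame : stateOf (cands ++ [(T, nm)]) = stateOf cands := by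
          rw [stateOf, stateOf, max?_append_singleton]
          cases h : PySem.List.max? cands (fun c => c.1) with
          | none =>
            exfalso
            apply hgt
            have : (stateOf cands).2 = 0 := by rw [stateOf, h]
            omega
          | some mm =>
            have hmm : mm.1 = (stateOf cands).2 := by rw [stateOf, h]
            have hlt : ¬ mm.1 < T := by omega
            dsimp only
            rw [if_neg hlt]
        rw [← hsame]
        exact ih hp' hsong' hm' (cands ++ [(T, nm)]) (by
          intro x hx
          rcases List.mem_append.mp hx with hx | hx
          · exact hc x hx
          · rcases List.mem_singleton.mp hx with rfl
            exact hM.1)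
    · rw [if_neg hM,
        if_neg (by rintro ⟨hgt, hMM⟩; exact hM ⟨by omega, hMM⟩)]
      exact ih hp' hsong' hm' cands hc

-- ===== VERDICT (by name: the statement is the Claim_ definition above) =====
theorem solution_spec : Claim_equal_solution := by
  intro m musicinfos _hdom hpre
  obtain ⟨hp, hsong, hm⟩ := hpre
  unfold Spec_solution solution solution_alt
  have h := fold_inv m musicinfos hp hsong hm [] (by intro x hx; cases hx)
  have h0 : stateOf [] = ("(None)", (0 : Int)) := rfl
  rw [h0] at h
  rw [h]
  cases hmax : PySem.List.max? (musicinfos.foldl (solStepB m) []) (fun c => c.1) with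
  | none => simp [stateOf, hmax]
  | some c => simp [stateOf, hmax]
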